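-- pv_equiv track=rewrite | github.com/YujiRS/MT5Tools | analysis/simulate_swing_signals.py | is_swing_high
-- ===== SOURCE A (Python) =====
-- def is_swing_high(highs, center, strength):
--     """Fractal方式 Swing High判定（等値は不成立）"""
--     if center - strength < 0 or center + strength >= len(highs):
--         return False
--     center_val = highs[center]
--     for i in range(1, strength + 1):
--         if highs[center - i] >= center_val:
--             return False
--         if highs[center + i] >= center_val:
--             return False
--     return True
-- ===== SOURCE B (Python) =====
-- def is_swing_high(highs, center, strength):
--     """Fractal Swing High: center is the unique maximum of the whole window
--     highs[center-strength : center+strength+1] (one slice; max + count instead of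
--     per-neighbor comparisons)."""
--     if center - strength < 0 or center + strength >= len(highs):
--         return False
--     cv = highs[center]
--     window = highs[center - strength:center + strength + 1]
--     return cv == max(window) and window.count(cv) == 1
-- ===== Notes on version B (the rewrite author's own statement) =====
-- stated objective: alternative
-- what changed: B characterizes a swing high as 'center value is the unique maximum of the single window highs[center-strength:center+strength+1]' (cv == max(window) and window.count(cv) == 1) instead of A's early-exit loop comparing each symmetric neighbor pair against the center.
-- outside the precondition, e.g. on is_swing_high([1, 9, 1, 1, 5], 1, -1): A returns True, B raises ValueError; on is_swing_high([5], 2, -2): A raises IndexError, B raises IndexError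
import Mathlib
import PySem

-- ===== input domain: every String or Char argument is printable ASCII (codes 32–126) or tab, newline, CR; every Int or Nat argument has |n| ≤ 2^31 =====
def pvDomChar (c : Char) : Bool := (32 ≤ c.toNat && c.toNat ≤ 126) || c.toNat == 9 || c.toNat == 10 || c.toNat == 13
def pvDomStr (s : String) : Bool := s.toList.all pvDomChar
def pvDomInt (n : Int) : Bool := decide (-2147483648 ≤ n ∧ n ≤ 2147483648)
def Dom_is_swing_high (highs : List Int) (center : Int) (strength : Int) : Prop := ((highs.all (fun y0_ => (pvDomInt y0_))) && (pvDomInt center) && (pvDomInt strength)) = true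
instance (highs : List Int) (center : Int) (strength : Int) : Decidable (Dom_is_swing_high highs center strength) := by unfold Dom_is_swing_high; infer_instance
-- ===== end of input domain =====

-- B decides "center is the unique maximum of the single window highs[center-strength:center+strength+1]"
-- (max + count over one slice) instead of A's early-exit per-neighbor-pair loop; objective: alternative, same cost.


-- ===== PORT A =====
-- the for-loop over range(1, strength+1); pyGetD is exact here: under Pre_ the loop body only
-- runs when the bounds guard holds with 0 ≤ strength, so every index it reads is in range
def iswLoopA (highs : List Int) (center : Int) (cv : Int) : List Int → Bool
  | [] => true
  | i :: rest =>
      if cv ≤ PySem.List.pyGetD highs (center - i) 0 then false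
      else if cv ≤ PySem.List.pyGetD highs (center + i) 0 then false
      else iswLoopA highs center cv rest

def is_swing_high (highs : List Int) (center : Int) (strength : Int) : Bool :=
  if center - strength < 0 ∨ (highs.length : Int) ≤ center + strength then false
  else
    match PySem.List.pyGet? highs center with
    | none => false  -- IndexError; outside Pre_
    | some cv => iswLoopA highs center cv (PySem.List.pyRange 1 (strength + 1) 1)

-- ===== PORT B =====
def is_swing_high_alt (highs : List Int) (center : Int) (strength : Int) : Bool :=
  if center - strength < 0 ∨ (highs.length : Int) ≤ center + strength then false
  else
    match PySem.List.pyGet? highs center with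
    | none => false  -- IndexError; outside Pre_
    | some cv =>
      let window := PySem.List.slice highs (some (center - strength)) (some (center + strength + 1))
      match window.max? with
      | none => false  -- max([]) raises ValueError; outside Pre_
      | some m => decide (cv = m) && (window.count cv == 1)

-- ===== PRECONDITION & SPEC =====
-- Pre_ excludes only negative strength that slips past the bounds guard: strength is a neighbor
-- count, so those inputs are outside the natural domain — there A's empty loop returns True via
-- an empty range (or raises IndexError on an out-of-range center) while B raises ValueError on
-- max of the empty window. Whenever the guard fails both return False, so those stay inside Pre_.
def Pre_is_swing_high (highs : List Int) (center : Int) (strength : Int) : Prop :=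
  0 ≤ strength ∨ center - strength < 0 ∨ (highs.length : Int) ≤ center + strength
instance (highs : List Int) (center : Int) (strength : Int) : Decidable (Pre_is_swing_high highs center strength) := by unfold Pre_is_swing_high; infer_instance

def pvWitness_is_swing_high : List Int × Int × Int := ([3, 5, 2], 1, 1)

def Spec_is_swing_high (highs : List Int) (center : Int) (strength : Int) (out : Bool) : Prop := out = is_swing_high_alt highs center strength
instance (highs : List Int) (center : Int) (strength : Int) (out : Bool) : Decidable (Spec_is_swing_high highs center strength out) := by unfold Spec_is_swing_high; infer_instance

-- ===== CLAIM (what is proved, stated in full; the proofs are below) =====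
def Claim_equal_is_swing_high : Prop := ∀ (highs : List Int) (center : Int) (strength : Int), Dom_is_swing_high highs center strength → Pre_is_swing_high highs center strength → Spec_is_swing_high highs center strength (is_swing_high highs center strength)

-- ===== LEMMAS AND PROOFS =====

-- A's loop returns true iff every probed neighbor is strictly below the center value
lemma iswLoopA_all_iff (highs : List Int) (center cv : Int) (l : List Int) :
    iswLoopA highs center cv l = true ↔
      ∀ i ∈ l, PySem.List.pyGetD highs (center - i) 0 < cv ∧ PySem.List.pyGetD highs (center + i) 0 < cv := by
  induction l with
  | nil => simp [iswLoopA]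
  | cons i rest ih =>
    simp only [iswLoopA, List.mem_cons]
    split_ifs with h1 h2
    · constructor
      · intro h; cases h
      · intro h; exact absurd (h i (Or.inl rfl)).1 (by omega)
    · constructor
      · intro h; cases h
      · intro h; exact absurd (h i (Or.inl rfl)).2 (by omega)
    · rw [ih]
      constructor
      · rintro h x (rfl | hx)
        · exact ⟨by omega, by omega⟩
        · exact h x hx
      · intro h x hx; exact h x (Or.inr hx)

-- B's test on a window decomposed around the center: "cv is the maximum and occurs once"
-- holds iff every other window element is strictly below cv
lemma uniqueMax_iff (L R : List Int) (cv : Int) :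
    (match (L ++ cv :: R).max? with
     | none => false
     | some m => decide (cv = m) && ((L ++ cv :: R).count cv == 1)) = true
    ↔ (∀ x ∈ L, x < cv) ∧ (∀ x ∈ R, x < cv) := by
  rcases hmax : (L ++ cv :: R).max? with _ | m
  · exact absurd (List.max?_eq_none_iff.mp hmax) (by simp)
  · rw [List.max?_eq_some_iff] at hmax
    obtain ⟨hmem, hle⟩ := hmax
    simp only [Bool.and_eq_true, decide_eq_true_eq, beq_iff_eq]
    rw [List.count_append, List.count_cons_self]
    constructor
    · rintro ⟨rfl, hc⟩
      have hL : L.count cv = 0 := by omega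
      have hR : R.count cv = 0 := by omega
      rw [List.count_eq_zero] at hL hR
      refine ⟨fun x hx => ?_, fun x hx => ?_⟩
      · exact lt_of_le_of_ne (hle x (by simp [hx])) (fun h => hL (h ▸ hx))
      · exact lt_of_le_of_ne (hle x (by simp [hx])) (fun h => hR (h ▸ hx))
    · rintro ⟨hL, hR⟩
      have hm : m = cv := by
        rcases List.mem_append.mp hmem with h | h
        · exact absurd (hle cv (by simp)) (by have := hL m h; omega)
        · rcases List.mem_cons.mp h with rfl | h
          · rfl
          · exact absurd (hle cv (by simp)) (by have := hR m h; omega)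
      refine ⟨hm.symm, ?_⟩
      have h1 : L.count cv = 0 := List.count_eq_zero.mpr (fun h => absurd (hL cv h) (by omega))
      have h2 : R.count cv = 0 := List.count_eq_zero.mpr (fun h => absurd (hR cv h) (by omega))
      omega

-- the window splits around the center element into left slice, center, right slice
lemma window_decomp (xs : List Int) (c s : Nat) (hsc : s ≤ c) (hcs : c + s < xs.length) :
    (xs.drop (c - s)).take (s + 1 + s)
      = (xs.drop (c - s)).take s ++ xs[c]'(by omega) :: (xs.drop (c + 1)).take s := by
  rw [show s + 1 + s = s + (1 + s) by omega, List.take_add]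
  congr 1
  rw [List.drop_drop, show c - s + s = c by omega,
    List.drop_eq_getElem_cons (by omega : c < xs.length),
    show 1 + s = s + 1 by omega, List.take_succ_cons]

-- elements of xs[a : a+k] are exactly xs.getD (a+j) for j < k (bounds in range)
lemma all_drop_take_iff (xs : List Int) (a k : Nat) (cv : Int) (hak : a + k ≤ xs.length) :
    (∀ x ∈ (xs.drop a).take k, x < cv) ↔ ∀ j, j < k → xs.getD (a + j) 0 < cv := by
  constructor
  · intro h j hj
    have hlen : a + j < xs.length := by omega
    rw [List.getD_eq_getElem xs 0 hlen]
    apply h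
    rw [List.mem_iff_getElem]
    refine ⟨j, by simp; omega, ?_⟩
    rw [List.getElem_take, List.getElem_drop]
  · intro h x hx
    rw [List.mem_iff_getElem] at hx
    obtain ⟨n, hn, rfl⟩ := hx
    rw [List.getElem_take, List.getElem_drop]
    have hnk : n < k := by simp at hn; omega
    have := h n hnk
    rwa [List.getD_eq_getElem xs 0 (by omega)] at this

-- ===== VERDICT (by name: the statement is the Claim_ definition above) =====
theorem is_swing_high_spec : Claim_equal_is_swing_high := by
  intro highs center strength _ hpre
  unfold Spec_is_swing_high is_swing_high is_swing_high_alt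
  by_cases hg : center - strength < 0 ∨ (highs.length : Int) ≤ center + strength
  · rw [if_pos hg, if_pos hg]
  · rw [if_neg hg, if_neg hg]
    have hs : 0 ≤ strength := by
      rcases hpre with h | h | h
      · exact h
      · exact absurd (Or.inl h) hg
      · exact absurd (Or.inr h) hg
    rw [not_or] at hg
    obtain ⟨h1, h2⟩ := hg
    rw [not_lt] at h1
    rw [not_le] at h2
    obtain ⟨s, rfl⟩ := Int.eq_ofNat_of_zero_le hs
    obtain ⟨c, rfl⟩ := Int.eq_ofNat_of_zero_le (show (0:Int) ≤ center by omega)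
    have hsc : s ≤ c := by omega
    have hcl : c < highs.length := by omega
    have hcsl : c + s < highs.length := by omega
    rw [PySem.List.pyGet?_natCast, List.getElem?_eq_getElem hcl]
    set cv := highs[c] with hcv
    have hw : PySem.List.slice highs (some ((c : Int) - s)) (some ((c : Int) + s + 1))
        = (highs.drop (c - s)).take s ++ cv :: (highs.drop (c + 1)).take s := by
      rw [show ((c : Int) - s) = ((c - s : Nat) : Int) by omega,
        show ((c : Int) + s + 1) = ((c + s + 1 : Nat) : Int) by omega, PySem.List.slice_natCast,
        show (highs.drop (c - s)).take (c + s + 1 - (c - s)) = (highs.drop (c - s)).take (s + 1 + s) by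
          congr 1; omega]
      exact window_decomp highs c s hsc hcsl
    show iswLoopA highs (c : Int) cv (PySem.List.pyRange 1 ((s : Int) + 1) 1) = _
    rw [hw, Bool.eq_iff_iff, iswLoopA_all_iff, uniqueMax_iff,
      all_drop_take_iff highs (c - s) s cv (by omega), all_drop_take_iff highs (c + 1) s cv (by omega)]
    constructor
    · intro h
      constructor
      · intro j hj
        have hm := (h ((s - j : Nat) : Int) (PySem.List.mem_pyRange_one.2 ⟨by omega, by omega⟩)).1
        rw [show ((c : Int) - ((s - j : Nat) : Int)) = ((c - s + j : Nat) : Int) by omega,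
          PySem.List.pyGetD_natCast] at hm
        exact hm
      · intro j hj
        have hm := (h ((j + 1 : Nat) : Int) (PySem.List.mem_pyRange_one.2 ⟨by omega, by omega⟩)).2
        rw [show ((c : Int) + ((j + 1 : Nat) : Int)) = ((c + 1 + j : Nat) : Int) by omega,
          PySem.List.pyGetD_natCast] at hm
        exact hm
    · rintro ⟨hL, hR⟩ i hi
      obtain ⟨hi1, hi2⟩ := PySem.List.mem_pyRange_one.1 hi
      obtain ⟨m, rfl⟩ := Int.eq_ofNat_of_zero_le (show (0:Int) ≤ i by omega)
      have hm1 : 1 ≤ m := by omega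
      have hms : m ≤ s := by omega
      constructor
      · have := hL (s - m) (by omega)
        rwa [show ((c : Int) - ((m : Nat) : Int)) = ((c - s + (s - m) : Nat) : Int) by omega,
          PySem.List.pyGetD_natCast]
      · have := hR (m - 1) (by omega)
        rwa [show ((c : Int) + ((m : Nat) : Int)) = ((c + 1 + (m - 1) : Nat) : Int) by omega,
          PySem.List.pyGetD_natCast]
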